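-- pv_equiv track=rewrite | github.com/Leapense/problems | 8436번： Kamil/Kamil.py | possible_words_count
-- ===== SOURCE A (Python) =====
-- from itertools import product
--
-- def possible_words_count(kamil_word):
--     # 변환 규칙 정의
--     transformation_map = {
--         'K': ['K', 'T'],
--         'T': ['T'],
--         'G': ['G', 'D'],
--         'D': ['D'],
--         'R': ['R', 'L', 'F'],
--         'L': ['L'],
--         'F': ['F']
--     }
--
--     # 각 문자에 대해 변환 가능성을 찾습니다.
--     possibilities = [transformation_map.get(char, [char]) for char in kamil_word]
--
--     # 가능한 모든 조합을 생성합니다.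
--     all_combinations = product(*possibilities)
--
--     # 고유한 조합의 수를 반환합니다.
--     unique_words = set(''.join(combination) for combination in all_combinations)
--     return len(unique_words)
-- ===== SOURCE B (Python) =====
-- def possible_words_count(kamil_word):
--     counts = {'K': 2, 'G': 2, 'R': 3}
--     result = 1
--     for char in kamil_word:
--         result *= counts.get(char, 1)
--     return result
-- ===== Notes on version B (the rewrite author's own statement) =====
-- stated objective: faster
-- what changed: Instead of materialising the full cartesian product of per-letter options and deduplicating strings in a set, B multiplies the number of options per character (2 for K and G, 3 for R, 1 otherwise), since all combinations are pairwise distinct.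
import Mathlib
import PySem

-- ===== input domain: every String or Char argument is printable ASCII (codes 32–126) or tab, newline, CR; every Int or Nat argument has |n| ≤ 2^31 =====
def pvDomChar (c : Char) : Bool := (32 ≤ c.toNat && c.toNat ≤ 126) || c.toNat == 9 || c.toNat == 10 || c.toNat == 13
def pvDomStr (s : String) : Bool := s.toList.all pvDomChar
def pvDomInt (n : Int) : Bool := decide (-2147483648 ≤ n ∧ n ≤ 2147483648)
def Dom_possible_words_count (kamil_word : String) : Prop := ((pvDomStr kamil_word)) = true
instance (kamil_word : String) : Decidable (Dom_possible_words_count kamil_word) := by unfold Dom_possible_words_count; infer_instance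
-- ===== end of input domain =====

-- B replaces A's full cartesian-product enumeration + set deduplication by a single pass
-- multiplying the number of options per character (objective: faster, asymptotically).

-- ===== PORT A =====
def pvTransformationMap : PySem.Dict Char (List Char) :=
  PySem.Dict.ofList [('K', ['K','T']), ('T', ['T']), ('G', ['G','D']), ('D', ['D']),
                     ('R', ['R','L','F']), ('L', ['L']), ('F', ['F'])]

-- itertools.product over a list of pools (first pool varies slowest)
def pvProduct : List (List Char) → List (List Char)
  | [] => [[]]
  | l :: ls => l.flatMap (fun x => (pvProduct ls).map (fun cs => x :: cs))

def possible_words_count (kamil_word : String) : Int :=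
  let possibilities := kamil_word.toList.map (fun c => pvTransformationMap.getD c [c])
  let allCombinations := pvProduct possibilities
  let uniqueWords := PySem.Set.ofList (allCombinations.map (fun comb => String.ofList comb))
  (uniqueWords.length : Int)

-- ===== PORT B =====
def pvCounts : PySem.Dict Char Int := PySem.Dict.ofList [('K', 2), ('G', 2), ('R', 3)]

def possible_words_count_alt (kamil_word : String) : Int :=
  kamil_word.toList.foldl (fun result char => result * pvCounts.getD char 1) 1

-- ===== PRECONDITION & SPEC =====
def Spec_possible_words_count (kamil_word : String) (out : Int) : Prop := out = possible_words_count_alt kamil_word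
instance (kamil_word : String) (out : Int) : Decidable (Spec_possible_words_count kamil_word out) := by unfold Spec_possible_words_count; infer_instance

-- ===== CLAIM (what is proved, stated in full; the proofs are below) =====
def Claim_equal_possible_words_count : Prop := ∀ (kamil_word : String), Dom_possible_words_count kamil_word → Spec_possible_words_count kamil_word (possible_words_count kamil_word)

-- ===== LEMMAS AND PROOFS =====

lemma pvTM_mk : pvTransformationMap = PySem.Dict.mk [('K', ['K','T']), ('T', ['T']),
    ('G', ['G','D']), ('D', ['D']), ('R', ['R','L','F']), ('L', ['L']), ('F', ['F'])] := by rfl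

lemma pvTM_getD (c : Char) : pvTransformationMap.getD c [c] =
    if c = 'K' then ['K','T'] else if c = 'T' then ['T'] else if c = 'G' then ['G','D']
    else if c = 'D' then ['D'] else if c = 'R' then ['R','L','F'] else if c = 'L' then ['L']
    else if c = 'F' then ['F'] else [c] := by
  rw [pvTM_mk]
  simp only [PySem.Dict.getD, PySem.Dict.get?_mk_cons, beq_iff_eq]
  split_ifs <;> subst_vars <;> simp_all [PySem.Dict.get?]

lemma pvCounts_mk : pvCounts = PySem.Dict.mk [('K', 2), ('G', 2), ('R', 3)] := by rfl

lemma pvCounts_getD (c : Char) : pvCounts.getD c 1 =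
    if c = 'K' then 2 else if c = 'G' then 2 else if c = 'R' then 3 else 1 := by
  rw [pvCounts_mk]
  simp only [PySem.Dict.getD, PySem.Dict.get?_mk_cons, beq_iff_eq]
  split_ifs <;> subst_vars <;> simp_all [PySem.Dict.get?]

lemma pvCounts_eq_len (c : Char) :
    pvCounts.getD c 1 = ((pvTransformationMap.getD c [c]).length : Int) := by
  rw [pvCounts_getD, pvTM_getD]; split_ifs <;> simp_all

lemma pvOpts_nodup (c : Char) : (pvTransformationMap.getD c [c]).Nodup := by
  rw [pvTM_getD]; split_ifs <;> simp

lemma pvProduct_nodup (ls : List (List Char)) (h : ∀ l ∈ ls, l.Nodup) :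
    (pvProduct ls).Nodup := by
  induction ls with
  | nil => simp [pvProduct]
  | cons l ls ih =>
    have hl : l.Nodup := h l (by simp)
    have hrest := ih (fun x hx => h x (by simp [hx]))
    simp only [pvProduct]
    rw [List.nodup_flatMap]
    refine ⟨fun x _ => hrest.map (fun a b hab => by injection hab), ?_⟩
    refine hl.imp ?_
    intro a b hne z hza hzb
    simp only [List.mem_map] at hza hzb
    obtain ⟨u, _, rfl⟩ := hza
    obtain ⟨v, _, h2⟩ := hzb
    exact hne (by injection h2.symm)

lemma pvProduct_length (ls : List (List Char)) :
    (pvProduct ls).length = (ls.map List.length).prod := by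
  induction ls with
  | nil => simp [pvProduct]
  | cons l ls ih =>
    simp [pvProduct, ih, List.map_const']

lemma ofList_injective : Function.Injective String.ofList := by
  intro a b h
  have := congrArg String.toList h
  simpa [String.toList_ofList] using this

lemma foldl_mul_eq_prod (cs : List Char) (a : Int) :
    cs.foldl (fun result char => result * pvCounts.getD char 1) a =
      a * (cs.map (fun c => pvCounts.getD c 1)).prod := by
  induction cs generalizing a with
  | nil => simp
  | cons c cs ih => simp [List.foldl_cons, ih, mul_assoc]

-- ===== VERDICT (by name: the statement is the Claim_ definition above) =====
theorem possible_words_count_spec : Claim_equal_possible_words_count := by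
  intro w _
  unfold Spec_possible_words_count possible_words_count possible_words_count_alt
  simp only []
  set P := w.toList.map (fun c => pvTransformationMap.getD c [c]) with hP
  have hnd : (pvProduct P).Nodup := by
    apply pvProduct_nodup
    intro l hl
    simp only [hP, List.mem_map] at hl
    obtain ⟨c, _, rfl⟩ := hl
    exact pvOpts_nodup c
  have hndm : ((pvProduct P).map (fun comb => String.ofList comb)).Nodup :=
    hnd.map ofList_injective
  rw [PySem.Set.ofList_eq_self_of_nodup _ hndm]
  rw [List.length_map, pvProduct_length]
  rw [foldl_mul_eq_prod, one_mul]
  simp only [hP, List.map_map]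
  rw [show (w.toList.map (fun c => pvCounts.getD c 1)).prod =
      (w.toList.map (fun c => ((pvTransformationMap.getD c [c]).length : Int))).prod from by
    congr 1; exact List.map_congr_left (fun c _ => pvCounts_eq_len c)]
  push_cast
  simp [Function.comp_def]
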